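-- pv_equiv track=rewrite | github.com/Motunrayo321/Programming-review | Week 5/Pset 5/Re-requesting a vanity plate/plates.py | first_zero
-- ===== SOURCE A (Python) =====
-- def first_zero(s):
--     flag = False
--
--     m = s[2:]
--
--     if m == '':
--         flag = True
--
--     for i in m:
--         if i.isdigit():
--             if i != '0':
--                 flag = True
--                 break
--             else:
--                 break
--         else:
--             flag = True
--             break
--
--     #print (flag)
--     return flag
-- ===== SOURCE B (Python) =====
-- def first_zero(s):
--     # Recursive descent: peel characters off the front one by one, counting down
--     # from 2; when the counter hits zero, the head character decides; if the
--     # string runs out first, the plate is valid.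
--     def go(chars, k):
--         if not chars:
--             return True
--         if k == 0:
--             return chars[0] != '0'
--         return go(chars[1:], k - 1)
--     return go(list(s), 2)
-- ===== Notes on version B (the rewrite author's own statement) =====
-- stated objective: alternative
-- what changed: Replaced A's slice-then-flag-loop (which builds s[2:], sets a flag and breaks on its first character) with a recursive descent that consumes characters from the front with a countdown counter and decides at the head when the counter reaches zero.
import Mathlib
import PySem

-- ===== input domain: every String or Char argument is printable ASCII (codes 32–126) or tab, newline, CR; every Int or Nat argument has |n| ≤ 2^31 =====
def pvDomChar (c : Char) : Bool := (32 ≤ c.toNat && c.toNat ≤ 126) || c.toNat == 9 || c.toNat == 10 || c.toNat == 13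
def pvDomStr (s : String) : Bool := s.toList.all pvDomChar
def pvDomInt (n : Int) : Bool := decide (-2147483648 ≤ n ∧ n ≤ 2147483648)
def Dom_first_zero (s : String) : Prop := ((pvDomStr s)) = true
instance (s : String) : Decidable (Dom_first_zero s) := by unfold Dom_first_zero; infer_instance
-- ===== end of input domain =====

-- B replaces A's slice/flag/loop with a recursive front-to-back descent with a countdown counter; objective: alternative.

-- ===== PORT A =====
-- the for-loop of A: every branch ends in 'break', so no recursion is ever taken
def first_zero_loop (flag : Bool) (m : List Char) : Bool :=
  match m with
  | [] => flag
  | i :: _ =>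
    if PySem.Chars.isdigit i then
      if i ≠ '0' then true   -- flag = True; break
      else flag              -- break
    else true                -- flag = True; break

def first_zero (s : String) : Bool :=
  let flag := false
  let m := PySem.List.slice s.toList (some 2) none
  let flag := if m = [] then true else flag
  first_zero_loop flag m

-- ===== PORT B =====
-- the inner recursive helper 'go' of Source B
def first_zero_go : List Char → Nat → Bool
  | [], _ => true
  | c :: _, 0 => decide (c ≠ '0')
  | _ :: cs, k + 1 => first_zero_go cs k

def first_zero_alt (s : String) : Bool :=
  first_zero_go s.toList 2

-- ===== PRECONDITION & SPEC =====
def Spec_first_zero (s : String) (out : Bool) : Prop := out = first_zero_alt s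
instance (s : String) (out : Bool) : Decidable (Spec_first_zero s out) := by unfold Spec_first_zero; infer_instance

-- ===== CLAIM (what is proved, stated in full; the proofs are below) =====
def Claim_equal_first_zero : Prop := ∀ (s : String), Dom_first_zero s → Spec_first_zero s (first_zero s)

-- ===== LEMMAS AND PROOFS =====
theorem first_zero_eq_alt (s : String) : first_zero s = first_zero_alt s := by
  unfold first_zero first_zero_alt
  rcases h : s.toList with _ | ⟨a, _ | ⟨b, _ | ⟨c, rest⟩⟩⟩ <;>
    simp [PySem.List.slice, first_zero_loop, first_zero_go, pysem]
  intro hd hc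
  subst hc
  simp [PySem.Chars.isdigit] at hd

-- ===== VERDICT (by name: the statement is the Claim_ definition above) =====
theorem first_zero_spec : Claim_equal_first_zero := by
  intro s _
  exact first_zero_eq_alt s
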